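-- pv_equiv track=rewrite | github.com/mihirhirave/Placement-Assignment_Mihir_Hirave | Py2.py | is_valid_string
-- ===== SOURCE A (Python) =====
-- def is_valid_string(s):
--     # Count the frequency of each character
--     char_count = {}
--     for char in s:
--         char_count[char] = char_count.get(char, 0) + 1
--
--     # Count the frequency of each frequency
--     freq_count = {}
--     for count in char_count.values():
--         freq_count[count] = freq_count.get(count, 0) + 1
--
--     # If there is only one frequency or two frequencies with a difference of one,
--     # the string is valid
--     if len(freq_count) == 1 or (len(freq_count) == 2 and 1 in freq_count.values()):
--         return "YES"
--     else:
--         return "NO"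
-- ===== SOURCE B (Python) =====
-- def _run_lengths(t):
--     # lengths of maximal runs of equal consecutive elements
--     lengths = []
--     while t:
--         head = t[0]
--         i = 1
--         while i < len(t) and t[i] == head:
--             i += 1
--         lengths.append(i)
--         t = t[i:]
--     return lengths
--
-- def is_valid_string(s):
--     # character frequencies via sort-and-group instead of hash counting
--     lengths = _run_lengths(sorted(s))
--     # frequency-of-frequencies multiplicities, again via sort-and-group
--     mults = _run_lengths(sorted(lengths))
--     if len(mults) == 1 or (len(mults) == 2 and 1 in mults):
--         return "YES"
--     return "NO"
-- ===== Notes on version B (the rewrite author's own statement) =====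
-- stated objective: alternative
-- what changed: Both frequency tables (char counts and their multiplicities) are obtained by sorting and run-length grouping consecutive equal elements instead of accumulating into dicts; the final condition reads the run lengths directly.
import Mathlib
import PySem

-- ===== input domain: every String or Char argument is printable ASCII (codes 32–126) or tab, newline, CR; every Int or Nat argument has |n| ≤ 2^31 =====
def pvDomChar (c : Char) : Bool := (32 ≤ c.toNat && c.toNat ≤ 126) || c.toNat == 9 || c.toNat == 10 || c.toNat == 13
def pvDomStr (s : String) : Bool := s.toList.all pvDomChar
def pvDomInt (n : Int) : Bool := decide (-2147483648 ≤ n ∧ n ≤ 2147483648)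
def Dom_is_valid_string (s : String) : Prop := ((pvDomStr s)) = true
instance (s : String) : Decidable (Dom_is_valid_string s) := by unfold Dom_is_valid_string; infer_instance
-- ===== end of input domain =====

-- B builds both frequency tables (char counts and their multiplicities) by sort + run-length
-- grouping instead of dict accumulation (alternative decomposition, identical results).

-- ===== PORT A =====
def is_valid_string (s : String) : String :=
  let char_count : PySem.Dict Char Int :=
    s.toList.foldl (fun d c => d.insert c (d.getD c 0 + 1)) PySem.Dict.empty
  let freq_count : PySem.Dict Int Int :=
    char_count.values.foldl (fun d c => d.insert c (d.getD c 0 + 1)) PySem.Dict.empty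
  if freq_count.size = 1 ∨ (freq_count.size = 2 ∧ (1 : Int) ∈ freq_count.values) then "YES"
  else "NO"

-- ===== PORT B =====
-- port of Source B's _run_lengths: lengths of maximal runs of consecutive equal elements
def pyRunLengths {α : Type} [BEq α] : List α → List Int
  | [] => []
  | x :: xs =>
    ((xs.takeWhile (fun y => y == x)).length + 1 : Int) ::
      pyRunLengths (xs.dropWhile (fun y => y == x))
termination_by l => l.length
decreasing_by
  simp only [List.length_cons]
  exact Nat.lt_succ_of_le (List.Sublist.length_le (List.dropWhile_sublist _))

def is_valid_string_alt (s : String) : String :=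
  let lengths := pyRunLengths (PySem.List.sorted s.toList (fun c => c) false)
  let mults := pyRunLengths (PySem.List.sorted lengths (fun n => n) false)
  if mults.length = 1 ∨ (mults.length = 2 ∧ (1 : Int) ∈ mults) then "YES"
  else "NO"

-- ===== PRECONDITION & SPEC =====
def Spec_is_valid_string (s : String) (out : String) : Prop := out = is_valid_string_alt s
instance (s : String) (out : String) : Decidable (Spec_is_valid_string s out) := by unfold Spec_is_valid_string; infer_instance

-- ===== CLAIM (what is proved, stated in full; the proofs are below) =====
def Claim_equal_is_valid_string : Prop := ∀ (s : String), Dom_is_valid_string s → Spec_is_valid_string s (is_valid_string s)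

-- ===== LEMMAS AND PROOFS =====

-- run lengths of a sorted list = counts of its distinct elements (up to permutation)
theorem pyRunLengths_sorted_perm {α : Type} [LinearOrder α] [BEq α] [LawfulBEq α] :
    ∀ (t : List α), t.Pairwise (· ≤ ·) →
    (pyRunLengths t).Perm ((PySem.Set.ofList t).map (fun c => (t.count c : Int))) := by
  intro t
  induction t using pyRunLengths.induct with
  | case1 => intro _; simp [pyRunLengths]
  | case2 x xs ih =>
    intro h
    have hxle : ∀ y ∈ xs, x ≤ y := (List.pairwise_cons.mp h).1
    have hxs_pw : xs.Pairwise (· ≤ ·) := (List.pairwise_cons.mp h).2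
    have hab : xs = xs.takeWhile (fun y => y == x) ++ xs.dropWhile (fun y => y == x) :=
      (List.takeWhile_append_dropWhile).symm
    have ha : ∀ y ∈ xs.takeWhile (fun y => y == x), y = x := by
      intro y hy
      have := List.mem_takeWhile_imp hy
      simpa using this
    have hb_pw : (xs.dropWhile (fun y => y == x)).Pairwise (· ≤ ·) :=
      hxs_pw.sublist (List.dropWhile_sublist _)
    have hxb : ∀ y ∈ xs.dropWhile (fun y => y == x), x < y := by
      cases hbe : xs.dropWhile (fun y => y == x) with
      | nil => intro y hy; simp at hy
      | cons b0 bt =>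
        have hb0ne : b0 ≠ x := by
          have hne : xs.dropWhile (fun y => y == x) ≠ [] := by rw [hbe]; simp
          have := List.head_dropWhile_not (fun y => y == x) hne
          simp only [hbe] at this
          simpa using this
        have hb0xs : b0 ∈ xs := by
          have : b0 ∈ xs.dropWhile (fun y => y == x) := by rw [hbe]; simp
          exact (List.dropWhile_sublist _).mem this
        have hxb0 : x < b0 := lt_of_le_of_ne (hxle b0 hb0xs) (Ne.symm hb0ne)
        intro y hy
        rcases List.mem_cons.mp hy with rfl | hyt
        · exact hxb0
        · have hchain : b0 ≤ y := by
            have := hb_pw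
            rw [hbe] at this
            exact (List.pairwise_cons.mp this).1 y hyt
          exact lt_of_lt_of_le hxb0 hchain
    have hxnb : x ∉ xs.dropWhile (fun y => y == x) := fun hx => lt_irrefl x (hxb x hx)
    have hcx : (x :: xs).count x = (xs.takeWhile (fun y => y == x)).length + 1 := by
      rw [List.count_cons_self]
      congr 1
      conv_lhs => rw [hab]
      rw [List.count_append]
      have h1 : (xs.takeWhile (fun y => y == x)).count x = (xs.takeWhile (fun y => y == x)).length :=
        List.count_eq_length.mpr (fun b hb => by simp [ha b hb])
      have h2 : (xs.dropWhile (fun y => y == x)).count x = 0 :=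
        List.count_eq_zero.mpr hxnb
      omega
    have hcb : ∀ c ∈ xs.dropWhile (fun y => y == x),
        (x :: xs).count c = (xs.dropWhile (fun y => y == x)).count c := by
      intro c hc
      have hcnex : c ≠ x := fun hcx' => absurd (hxb c hc) (by simp [hcx'])
      rw [List.count_cons_of_ne (fun hh => hcnex hh.symm)]
      conv_lhs => rw [hab]
      rw [List.count_append]
      have h0 : (xs.takeWhile (fun y => y == x)).count c = 0 :=
        List.count_eq_zero.mpr (fun hcmem => hcnex (ha c hcmem))
      omega
    have hset : (PySem.Set.ofList (x :: xs)).Perm (x :: PySem.Set.ofList (xs.dropWhile (fun y => y == x))) := by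
      refine (List.perm_ext_iff_of_nodup (PySem.Set.nodup_ofList _) ?_).mpr ?_
      · exact List.nodup_cons.mpr ⟨by simpa [PySem.Set.mem_ofList] using hxnb, PySem.Set.nodup_ofList _⟩
      · intro a
        simp only [PySem.Set.mem_ofList, List.mem_cons]
        constructor
        · rintro (rfl | haxs)
          · exact Or.inl rfl
          · rw [hab] at haxs
            rcases List.mem_append.mp haxs with hta | htb
            · exact Or.inl (ha a hta)
            · exact Or.inr (by simpa [PySem.Set.mem_ofList] using htb)
        · rintro (rfl | hb)
          · exact Or.inl rfl
          · refine Or.inr ?_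
            rw [hab]
            exact List.mem_append.mpr (Or.inr (by simpa [PySem.Set.mem_ofList] using hb))
    rw [pyRunLengths]
    refine List.Perm.trans ?_ ((hset.map _).symm)
    rw [List.map_cons]
    have hmap : (PySem.Set.ofList (xs.dropWhile (fun y => y == x))).map (fun c => (((x :: xs).count c : Int))) =
        (PySem.Set.ofList (xs.dropWhile (fun y => y == x))).map (fun c => (((xs.dropWhile (fun y => y == x)).count c : Int))) := by
      refine List.map_congr_left ?_
      intro c hc
      have := hcb c (by simpa [PySem.Set.mem_ofList] using hc)
      simp [this]
    rw [hmap, hcx]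
    refine List.Perm.cons _ ?_
    exact ih hb_pw

-- the distinct-elements/count table is permutation-invariant
theorem setmap_count_perm {α : Type} [BEq α] [LawfulBEq α] {l1 l2 : List α} (h : l1.Perm l2) :
    ((PySem.Set.ofList l1).map (fun c => (l1.count c : Int))).Perm
      ((PySem.Set.ofList l2).map (fun c => (l2.count c : Int))) := by
  have hf : (fun c => (l1.count c : Int)) = (fun c => (l2.count c : Int)) := by
    funext c; exact_mod_cast h.count_eq c
  rw [hf]
  refine List.Perm.map _ ?_
  refine (List.perm_ext_iff_of_nodup (PySem.Set.nodup_ofList l1) (PySem.Set.nodup_ofList l2)).mpr ?_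
  intro a; simp [PySem.Set.mem_ofList, h.mem_iff]

-- run lengths of sorted xs ~ the values of Counter(xs)
theorem pyRunLengths_sorted_perm_counts {α : Type} [LinearOrder α] [BEq α] [LawfulBEq α] (l : List α) :
    (pyRunLengths (PySem.List.sorted l (fun c => c) false)).Perm
      ((PySem.Set.ofList l).map (fun c => (l.count c : Int))) := by
  refine List.Perm.trans (pyRunLengths_sorted_perm _ ?_) (setmap_count_perm (PySem.List.sorted_perm l _ _))
  exact PySem.List.sorted_pairwise l (fun c => c)

theorem counter_values {α : Type} [BEq α] [LawfulBEq α] (l : List α) :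
    (PySem.Dict.counter l).values = (PySem.Set.ofList l).map (fun k => (l.count k : Int)) := by
  simp [PySem.Dict.values, PySem.Dict.items_counter, List.map_map, Function.comp]

theorem dict_size_values {κ ν : Type} [BEq κ] (d : PySem.Dict κ ν) :
    d.size = d.values.length := by
  simp [PySem.Dict.size, PySem.Dict.values]

-- ===== VERDICT (by name: the statement is the Claim_ definition above) =====
theorem is_valid_string_spec : Claim_equal_is_valid_string := by
  intro s _
  unfold Spec_is_valid_string is_valid_string is_valid_string_alt
  simp only [PySem.Dict.foldl_insert_getD_add_one_eq_counter]
  have hv : (pyRunLengths (PySem.List.sorted s.toList (fun c => c) false)).Perm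
      ((PySem.Dict.counter s.toList).values) := by
    rw [counter_values]
    exact pyRunLengths_sorted_perm_counts s.toList
  have hm : (pyRunLengths (PySem.List.sorted
        (pyRunLengths (PySem.List.sorted s.toList (fun c => c) false)) (fun n => n) false)).Perm
      ((PySem.Dict.counter ((PySem.Dict.counter s.toList).values)).values) := by
    rw [counter_values]
    exact List.Perm.trans (pyRunLengths_sorted_perm_counts _) (setmap_count_perm hv)
  have hsize : (PySem.Dict.counter ((PySem.Dict.counter s.toList).values)).size =
      (pyRunLengths (PySem.List.sorted
        (pyRunLengths (PySem.List.sorted s.toList (fun c => c) false)) (fun n => n) false)).length := by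
    rw [dict_size_values]
    exact hm.length_eq.symm
  have hmem : ((1 : Int) ∈ (PySem.Dict.counter ((PySem.Dict.counter s.toList).values)).values) ↔
      ((1 : Int) ∈ pyRunLengths (PySem.List.sorted
        (pyRunLengths (PySem.List.sorted s.toList (fun c => c) false)) (fun n => n) false)) :=
    (hm.mem_iff).symm
  rw [if_congr (by rw [hsize, hmem]) rfl rfl]
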